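-- pv_equiv track=rewrite | github.com/pypi-data/pypi-mirror-57 | packages/iotoutlier1/iotoutlier1-0.0.1-py3-none-any.whl/iot_outlier_src/data_process/parse_subflows.py | _label_subflows
-- ===== SOURCE A (Python) =====
-- def _label_subflows(subflows, labels):
--     '''Assigns singular labels to each subflow depending on the set of flows it contains
--        If *all* contained flows are benign, the subflow is benign, otherwise malicious
--
--     Arguments:
--       subflows = subflows format returned from _parse_subflows()
--       labels = labels format returned from _load_labels()
--
--     Returns:
--       subflow_labels [string] = list of 1 string label per equivalently indexed subflow
--     '''
--     subflow_labels = []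
--     for fids, _, _ in subflows:
--         fids_labels = []
--         for fid in fids:
--             try:
--                 fids_labels.append(labels[fid])
--             except KeyError:
--                 fids_labels.append("UNKNOWN")
--         unique_labels = list(set(fids_labels))
--         if all(label == "UNKNOWN" for label in fids_labels):
--             subflow_labels.append("UNKNOWN")
--         elif all(label == "BENIGN" or label == "UNKNOWN" for label in fids_labels):
--             subflow_labels.append("BENIGN")
--         else:
--             subflow_labels.append("MALICIOUS")
--     return subflow_labels
-- ===== SOURCE B (Python) =====
-- def _label_subflows(subflows, labels):
--     '''Single pass per subflow: two booleans instead of building the label list and scanning twice.'''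
--     subflow_labels = []
--     for fids, _, _ in subflows:
--         saw_non_unknown = False
--         saw_malicious = False
--         for fid in fids:
--             label = labels.get(fid, "UNKNOWN")
--             if label != "UNKNOWN":
--                 saw_non_unknown = True
--                 if label != "BENIGN":
--                     saw_malicious = True
--         subflow_labels.append(
--             "MALICIOUS" if saw_malicious
--             else "BENIGN" if saw_non_unknown
--             else "UNKNOWN")
--     return subflow_labels
-- ===== Notes on version B (the rewrite author's own statement) =====
-- stated objective: faster
-- what changed: One pass per subflow maintaining two booleans (saw_non_unknown, saw_malicious) with dict.get instead of building the per-subflow label list via try/except and scanning it twice with all(); the dead unique_labels set build is dropped.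
import Mathlib
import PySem

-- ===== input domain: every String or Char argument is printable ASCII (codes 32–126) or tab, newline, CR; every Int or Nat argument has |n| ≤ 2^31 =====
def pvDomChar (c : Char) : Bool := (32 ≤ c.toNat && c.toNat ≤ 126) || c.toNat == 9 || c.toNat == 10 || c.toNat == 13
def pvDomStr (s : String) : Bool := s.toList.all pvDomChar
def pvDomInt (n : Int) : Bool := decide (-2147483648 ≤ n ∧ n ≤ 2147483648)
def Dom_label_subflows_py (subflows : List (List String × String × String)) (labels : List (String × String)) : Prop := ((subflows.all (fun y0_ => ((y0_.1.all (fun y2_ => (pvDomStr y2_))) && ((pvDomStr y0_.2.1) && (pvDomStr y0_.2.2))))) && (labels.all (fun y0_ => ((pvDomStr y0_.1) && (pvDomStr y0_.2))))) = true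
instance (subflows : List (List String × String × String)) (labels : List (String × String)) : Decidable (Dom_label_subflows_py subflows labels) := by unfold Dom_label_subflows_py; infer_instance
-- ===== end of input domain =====

-- B replaces A's build-a-label-list-then-scan-twice-with-all() structure by a single pass per
-- subflow over two booleans (simpler; dead unique_labels set dropped). Return values proved equal.

-- ===== PORT A =====
def label_subflows_py (subflows : List (List String × String × String)) (labels : List (String × String)) : List String :=
  subflows.foldl (fun subflow_labels sf =>
    let fids := sf.1
    -- try: labels[fid] / except KeyError: "UNKNOWN"
    let fids_labels := fids.foldl (fun fl fid =>
      fl ++ [match (PySem.Dict.mk labels).get? fid with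
             | some v => v
             | none => "UNKNOWN"]) []
    let _unique_labels := PySem.Set.ofList fids_labels   -- dead in A, kept for faithfulness
    if fids_labels.all (fun l => l == "UNKNOWN") then
      subflow_labels ++ ["UNKNOWN"]
    else if fids_labels.all (fun l => l == "BENIGN" || l == "UNKNOWN") then
      subflow_labels ++ ["BENIGN"]
    else
      subflow_labels ++ ["MALICIOUS"]) []

-- ===== PORT B =====
def label_subflows_py_alt (subflows : List (List String × String × String)) (labels : List (String × String)) : List String :=
  subflows.foldl (fun subflow_labels sf =>
    let flags := sf.1.foldl (fun (st : Bool × Bool) fid =>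
      let label := ((PySem.Dict.mk labels).get? fid).getD "UNKNOWN"
      if label != "UNKNOWN" then
        (true, if label != "BENIGN" then true else st.2)
      else st) (false, false)
    subflow_labels ++
      [if flags.2 then "MALICIOUS" else if flags.1 then "BENIGN" else "UNKNOWN"]) []

-- ===== PRECONDITION & SPEC =====
def Spec_label_subflows_py (subflows : List (List String × String × String)) (labels : List (String × String)) (out : List String) : Prop := out = label_subflows_py_alt subflows labels
instance (subflows : List (List String × String × String)) (labels : List (String × String)) (out : List String) : Decidable (Spec_label_subflows_py subflows labels out) := by unfold Spec_label_subflows_py; infer_instance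

-- ===== CLAIM (what is proved, stated in full; the proofs are below) =====
def Claim_equal_label_subflows_py : Prop := ∀ (subflows : List (List String × String × String)) (labels : List (String × String)), Dom_label_subflows_py subflows labels → Spec_label_subflows_py subflows labels (label_subflows_py subflows labels)

-- ===== LEMMAS AND PROOFS =====

-- the effective label of one flow id
def pvLbl (labels : List (String × String)) (fid : String) : String :=
  ((PySem.Dict.mk labels).get? fid).getD "UNKNOWN"

-- B's inner fold computes (any non-unknown, any malicious)
lemma pv_inner_flags (labels : List (String × String)) (fids : List String) (st : Bool × Bool) :
    fids.foldl (fun (st : Bool × Bool) fid =>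
      let label := ((PySem.Dict.mk labels).get? fid).getD "UNKNOWN"
      if label != "UNKNOWN" then
        (true, if label != "BENIGN" then true else st.2)
      else st) st
    = (st.1 || fids.any (fun fid => pvLbl labels fid != "UNKNOWN"),
       st.2 || fids.any (fun fid => pvLbl labels fid != "UNKNOWN" && pvLbl labels fid != "BENIGN")) := by
  induction fids generalizing st with
  | nil => simp
  | cons x xs ih =>
    simp only [List.foldl_cons, List.any_cons, ih, pvLbl]
    by_cases hU : (((PySem.Dict.mk labels).get? x).getD "UNKNOWN") = "UNKNOWN" <;>
      by_cases hB : (((PySem.Dict.mk labels).get? x).getD "UNKNOWN") = "BENIGN" <;>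
        simp [hU, hB]

-- A's try/except loop builds the mapped label list
lemma pv_inner_list (labels : List (String × String)) (fids : List String) (acc : List String) :
    fids.foldl (fun fl fid =>
      fl ++ [match (PySem.Dict.mk labels).get? fid with
             | some v => v
             | none => "UNKNOWN"]) acc = acc ++ fids.map (pvLbl labels) := by
  induction fids generalizing acc with
  | nil => simp
  | cons x xs ih =>
    simp only [List.foldl_cons, List.map_cons, ih]
    have : (match (PySem.Dict.mk labels).get? x with
            | some v => v | none => "UNKNOWN") = pvLbl labels x := by
      unfold pvLbl; cases (PySem.Dict.mk labels).get? x <;> rfl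
    simp [this]

-- one subflow: A's three-branch all()-check equals B's two flags
lemma pv_one (labels : List (String × String)) (fids : List String) :
    (if (fids.map (pvLbl labels)).all (fun l => l == "UNKNOWN") then "UNKNOWN"
     else if (fids.map (pvLbl labels)).all (fun l => l == "BENIGN" || l == "UNKNOWN") then "BENIGN"
     else "MALICIOUS")
    = (if (fids.any (fun fid => pvLbl labels fid != "UNKNOWN" && pvLbl labels fid != "BENIGN")) then "MALICIOUS"
       else if (fids.any (fun fid => pvLbl labels fid != "UNKNOWN")) then "BENIGN"
       else "UNKNOWN") := by
  have hU : (fids.map (pvLbl labels)).all (fun l => l == "UNKNOWN")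
      = !(fids.any (fun fid => pvLbl labels fid != "UNKNOWN")) := by
    simp [List.all_eq_not_any_not, Function.comp_def, bne]
  have hBU : (fids.map (pvLbl labels)).all (fun l => l == "BENIGN" || l == "UNKNOWN")
      = !(fids.any (fun fid => pvLbl labels fid != "UNKNOWN" && pvLbl labels fid != "BENIGN")) := by
    simp only [List.any_map, List.all_eq_not_any_not, Function.comp_def, bne]
    refine congrArg Bool.not (List.any_congr rfl fun fid => ?_)
    cases h1 : pvLbl labels fid == "UNKNOWN" <;> cases h2 : pvLbl labels fid == "BENIGN" <;>
      simp_all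
  rw [hU, hBU]
  have himp : (fids.any (fun fid => pvLbl labels fid != "UNKNOWN" && pvLbl labels fid != "BENIGN")) = true
      → (fids.any (fun fid => pvLbl labels fid != "UNKNOWN")) = true := by
    simp only [List.any_eq_true]
    rintro ⟨fid, hm, hq⟩
    exact ⟨fid, hm, (Bool.and_eq_true_iff.mp hq).1⟩
  cases ha : fids.any (fun fid => pvLbl labels fid != "UNKNOWN") <;>
    cases hb : fids.any (fun fid => pvLbl labels fid != "UNKNOWN" && pvLbl labels fid != "BENIGN") <;>
      simp_all

-- main equality, proved with a common accumulator
lemma pv_main (labels : List (String × String)) (subflows : List (List String × String × String))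
    (acc : List String) :
    subflows.foldl (fun subflow_labels sf =>
      let fids := sf.1
      let fids_labels := fids.foldl (fun fl fid =>
        fl ++ [match (PySem.Dict.mk labels).get? fid with
               | some v => v | none => "UNKNOWN"]) []
      let _unique_labels := PySem.Set.ofList fids_labels
      if fids_labels.all (fun l => l == "UNKNOWN") then subflow_labels ++ ["UNKNOWN"]
      else if fids_labels.all (fun l => l == "BENIGN" || l == "UNKNOWN") then subflow_labels ++ ["BENIGN"]
      else subflow_labels ++ ["MALICIOUS"]) acc
    = subflows.foldl (fun subflow_labels sf =>
      let flags := sf.1.foldl (fun (st : Bool × Bool) fid =>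
        let label := ((PySem.Dict.mk labels).get? fid).getD "UNKNOWN"
        if label != "UNKNOWN" then (true, if label != "BENIGN" then true else st.2) else st)
        (false, false)
      subflow_labels ++
        [if flags.2 then "MALICIOUS" else if flags.1 then "BENIGN" else "UNKNOWN"]) acc := by
  induction subflows generalizing acc with
  | nil => rfl
  | cons sf rest ih =>
    simp only [List.foldl_cons]
    rw [ih]
    congr 1
    simp only [pv_inner_list, pv_inner_flags, List.nil_append, Bool.false_or]
    have h := pv_one labels sf.1
    split_ifs at h ⊢ <;> simp_all

-- ===== VERDICT (by name: the statement is the Claim_ definition above) =====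
theorem label_subflows_py_spec : Claim_equal_label_subflows_py := by
  intro subflows labels _
  unfold Spec_label_subflows_py label_subflows_py label_subflows_py_alt
  exact pv_main labels subflows []
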